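-- pv_equiv track=rewrite | github.com/aguirre-ivan/algo1-tps | TETRIS/tetris.py | pieza_en_origen
-- ===== SOURCE A (Python) =====
-- def trasladar_pieza(pieza, dx, dy):
-- 	"""
-- 	Traslada la pieza de su posición actual a (posicion + (dx, dy)).
--
-- 	La pieza está representada como una tupla de posiciones ocupadas,
-- 	donde cada posición ocupada es una tupla (x, y).
-- 	Por ejemplo para la pieza ( (0, 0), (0, 1), (0, 2), (0, 3) ) y
-- 	el desplazamiento dx=2, dy=3 se devolverá la pieza
-- 	( (2, 3), (2, 4), (2, 5), (2, 6) ).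
-- 	"""
-- 	pieza_trasladada = ()
-- 	for (x, y) in pieza:
-- 		pieza_trasladada += ((x + dx, y + dy,),)
-- 	return pieza_trasladada
--
-- def pieza_en_origen(pieza):
-- 	"""
-- 	Recibida la rotacion de una pieza, la ubica en el origen (no en el centro).
-- 	Devuelve la pieza ubicada en el origen y una tupla de coordenadas de cuanto hay que trasladarla para devolverla a su posicion original.
-- 	"""
-- 	x = 0
-- 	y = 0
-- 	while pieza[0][0] > 0:
-- 		pieza = trasladar_pieza(pieza, -1, 0)
-- 		x += 1
-- 	while pieza[0][1] > 0:
-- 		pieza = trasladar_pieza(pieza, 0, -1)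
-- 		y += 1
-- 	return (pieza, (x, y))
-- ===== SOURCE B (Python) =====
-- def pieza_en_origen(pieza):
--     dx = max(pieza[0][0], 0)
--     dy = max(pieza[0][1], 0)
--     return (tuple((x - dx, y - dy) for (x, y) in pieza), (dx, dy))
-- ===== Notes on version B (the rewrite author's own statement) =====
-- stated objective: faster
-- what changed: B computes the offsets directly as the clamped-positive anchor coordinates and performs one single translation pass, instead of A's repeated whole-piece translations one cell at a time.
import Mathlib
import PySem

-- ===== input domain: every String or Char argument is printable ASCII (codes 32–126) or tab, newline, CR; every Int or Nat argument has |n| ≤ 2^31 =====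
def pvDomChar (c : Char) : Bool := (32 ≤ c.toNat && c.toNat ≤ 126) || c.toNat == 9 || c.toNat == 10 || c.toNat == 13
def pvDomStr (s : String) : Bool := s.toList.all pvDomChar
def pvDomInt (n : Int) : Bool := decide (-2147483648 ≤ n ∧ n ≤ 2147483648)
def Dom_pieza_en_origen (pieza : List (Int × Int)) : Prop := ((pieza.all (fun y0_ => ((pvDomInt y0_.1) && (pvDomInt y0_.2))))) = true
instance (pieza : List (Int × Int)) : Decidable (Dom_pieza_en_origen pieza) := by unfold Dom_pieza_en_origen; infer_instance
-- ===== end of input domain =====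

-- B replaces A's cell-by-cell repeated translations with one direct offset computation and a single translation pass.

-- ===== PORT A =====
def trasladar_pieza (pieza : List (Int × Int)) (dx dy : Int) : List (Int × Int) :=
  pieza.foldl (fun acc xy => acc ++ [(xy.1 + dx, xy.2 + dy)]) []

-- needed by the ports' termination proofs (cited in decreasing_by)
theorem trasladar_pieza_eq_map (pieza : List (Int × Int)) (dx dy : Int) :
    trasladar_pieza pieza dx dy = pieza.map (fun q => (q.1 + dx, q.2 + dy)) := by
  have h : ∀ (l : List (Int × Int)) (acc : List (Int × Int)),
      l.foldl (fun acc xy => acc ++ [(xy.1 + dx, xy.2 + dy)]) acc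
        = acc ++ l.map (fun q => (q.1 + dx, q.2 + dy)) := by
    intro l
    induction l with
    | nil => simp
    | cons p t ih => intro acc; simp [ih]
  simpa [trasladar_pieza] using h pieza []

-- 'while pieza[0][0] > 0: pieza = trasladar_pieza(pieza, -1, 0); x += 1'
def pvLoopX : List (Int × Int) → Int → (List (Int × Int)) × Int
  | [], x => ([], x)
  | (p :: rest), x =>
    if p.1 > 0 then pvLoopX (trasladar_pieza (p :: rest) (-1) 0) (x + 1)
    else (p :: rest, x)
termination_by pieza _ => ((pieza.head?.map Prod.fst).getD 0).toNat
decreasing_by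
  simp [trasladar_pieza_eq_map]
  omega

-- 'while pieza[0][1] > 0: pieza = trasladar_pieza(pieza, 0, -1); y += 1'
def pvLoopY : List (Int × Int) → Int → (List (Int × Int)) × Int
  | [], y => ([], y)
  | (p :: rest), y =>
    if p.2 > 0 then pvLoopY (trasladar_pieza (p :: rest) 0 (-1)) (y + 1)
    else (p :: rest, y)
termination_by pieza _ => ((pieza.head?.map Prod.snd).getD 0).toNat
decreasing_by
  simp [trasladar_pieza_eq_map]
  omega

def pieza_en_origen (pieza : List (Int × Int)) : (List (Int × Int)) × (Int × Int) :=
  let rx := pvLoopX pieza 0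
  let ry := pvLoopY rx.1 0
  (ry.1, (rx.2, ry.2))

-- ===== PORT B =====
def pieza_en_origen_alt (pieza : List (Int × Int)) : (List (Int × Int)) × (Int × Int) :=
  match pieza with
  | [] => ([], (0, 0))   -- B raises IndexError here (outside Pre_)
  | p :: _ =>
    let dx := max p.1 0
    let dy := max p.2 0
    (pieza.map (fun q => (q.1 - dx, q.2 - dy)), (dx, dy))

-- ===== PRECONDITION & SPEC =====
-- A indexes pieza[0], so it raises IndexError on the empty piece; excluded.
def Pre_pieza_en_origen (pieza : List (Int × Int)) : Prop := pieza ≠ []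
instance (pieza : List (Int × Int)) : Decidable (Pre_pieza_en_origen pieza) := by unfold Pre_pieza_en_origen; infer_instance
def pvWitness_pieza_en_origen : (List (Int × Int)) := [(2, 1), (3, 1)]

def Spec_pieza_en_origen (pieza : List (Int × Int)) (out : (List (Int × Int)) × (Int × Int)) : Prop := out = pieza_en_origen_alt pieza
instance (pieza : List (Int × Int)) (out : (List (Int × Int)) × (Int × Int)) : Decidable (Spec_pieza_en_origen pieza out) := by unfold Spec_pieza_en_origen; infer_instance

-- ===== CLAIM (what is proved, stated in full; the proofs are below) =====
def Claim_equal_pieza_en_origen : Prop := ∀ (pieza : List (Int × Int)), Dom_pieza_en_origen pieza → Pre_pieza_en_origen pieza → Spec_pieza_en_origen pieza (pieza_en_origen pieza)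

-- ===== LEMMAS AND PROOFS =====

theorem pvLoopX_eq (pieza : List (Int × Int)) (x : Int) :
    pvLoopX pieza x
      = (pieza.map (fun q => (q.1 - max ((pieza.head?.map Prod.fst).getD 0) 0, q.2)),
         x + max ((pieza.head?.map Prod.fst).getD 0) 0) := by
  induction pieza, x using pvLoopX.induct with
  | case1 x => simp [pvLoopX]
  | case2 p rest x hpos ih =>
    rw [pvLoopX, if_pos hpos, ih]
    have h1 : max p.1 0 = p.1 := by omega
    have h2 : max (p.1 - 1) 0 = p.1 - 1 := by omega
    simp [trasladar_pieza_eq_map, h1, List.map_map, Function.comp]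
    exact ⟨⟨by omega, fun a b _ => by omega⟩, by omega⟩
  | case3 p rest x hneg =>
    rw [pvLoopX, if_neg hneg]
    simp at hneg
    have : max p.1 0 = 0 := by omega
    simp [this]

theorem pvLoopY_eq (pieza : List (Int × Int)) (y : Int) :
    pvLoopY pieza y
      = (pieza.map (fun q => (q.1, q.2 - max ((pieza.head?.map Prod.snd).getD 0) 0)),
         y + max ((pieza.head?.map Prod.snd).getD 0) 0) := by
  induction pieza, y using pvLoopY.induct with
  | case1 y => simp [pvLoopY]
  | case2 p rest y hpos ih =>
    rw [pvLoopY, if_pos hpos, ih]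
    have h1 : max p.2 0 = p.2 := by omega
    simp [trasladar_pieza_eq_map, h1, List.map_map, Function.comp]
    exact ⟨⟨by omega, fun a b _ => by omega⟩, by omega⟩
  | case3 p rest y hneg =>
    rw [pvLoopY, if_neg hneg]
    simp at hneg
    have : max p.2 0 = 0 := by omega
    simp [this]

-- ===== VERDICT (by name: the statement is the Claim_ definition above) =====
theorem pieza_en_origen_spec : Claim_equal_pieza_en_origen := by
  intro pieza _ hpre
  unfold Spec_pieza_en_origen
  match pieza, hpre with
  | p :: rest, _ =>
    simp only [pieza_en_origen, pieza_en_origen_alt, pvLoopX_eq, pvLoopY_eq,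
      List.head?_cons, List.head?_map, Option.map_some, Option.getD_some, List.map_map]
    refine Prod.ext ?_ (by simp)
    show List.map _ _ = List.map _ _
    exact List.map_congr_left (fun q _ => by simp [Function.comp])
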